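-- pv_equiv track=rewrite | github.com/ramesh-kasula/2020501091_ramesh_CP_elect | 04-longestdigitrun-Python/longestdigitrun.py | longestdigitrun
-- ===== SOURCE A (Python) =====
-- def longestdigitrun(n):
-- 	# Your code goes here
-- 	# pass
-- 	n=abs(n)
-- 	c=1
-- 	num=0
-- 	maxc=0
-- 	while n>0:
-- 		a=n%10
-- 		n=n//10
-- 		b=n%10
-- 		if a==b:
-- 			c+=1
-- 		else:
-- 			if maxc==c:
-- 				if num>=a:
-- 					num=a
-- 			elif(maxc<c):
-- 				maxc=c
-- 				num=a
-- 			c=1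
-- 	return num
-- ===== SOURCE B (Python) =====
-- def longestdigitrun(n):
--     # Phase 1: digit list of abs(n), least-significant first (n=0 gives [0]).
--     n = abs(n)
--     digits = []
--     while True:
--         digits.append(n % 10)
--         n //= 10
--         if n == 0:
--             break
--     # Phase 2: maximal equal-digit runs as (digit, length) pairs, by head-grouping recursion.
--     def runs(ds):
--         if not ds:
--             return []
--         rest = runs(ds[1:])
--         if rest and rest[0][0] == ds[0]:
--             return [(ds[0], rest[0][1] + 1)] + rest[1:]
--         return [(ds[0], 1)] + rest
--     rs = runs(digits)
--     # Phase 3: longest run length, then smallest digit among runs of that length.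
--     m = max(length for _, length in rs)
--     return min(d for d, length in rs if length == m)
-- ===== Notes on version B (the rewrite author's own statement) =====
-- stated objective: alternative
-- what changed: A's fused single-pass arithmetic scan that interleaves run counting with max/min tie-breaking is replaced by a three-phase group-then-aggregate pipeline: build the digit list of abs(n), group it into explicit (digit, run-length) runs, then take the smallest digit among runs of maximal length.
import Mathlib
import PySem

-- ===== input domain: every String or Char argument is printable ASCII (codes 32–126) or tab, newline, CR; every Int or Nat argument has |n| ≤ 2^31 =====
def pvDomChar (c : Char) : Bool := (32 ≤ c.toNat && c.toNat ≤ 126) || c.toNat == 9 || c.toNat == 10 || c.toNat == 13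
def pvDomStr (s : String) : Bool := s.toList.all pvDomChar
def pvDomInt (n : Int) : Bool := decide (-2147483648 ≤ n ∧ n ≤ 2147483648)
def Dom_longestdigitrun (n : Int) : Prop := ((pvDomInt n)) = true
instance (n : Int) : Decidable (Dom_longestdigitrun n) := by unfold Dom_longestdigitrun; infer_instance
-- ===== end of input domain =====

-- B replaces A's fused arithmetic counter scan by a three-phase decomposition
-- (digit list, explicit run list, max/min aggregation); objective: alternative/simpler structure.

-- ===== PORT A =====
-- A's while loop: state (c, num, maxc), scanning digits least-significant first.
def lruLoop (n c num maxc : Int) : Int :=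
  if h : n > 0 then
    let a := PySem.Int.mod n 10
    let n' := PySem.Int.floordiv n 10
    let b := PySem.Int.mod n' 10
    if a = b then lruLoop n' (c + 1) num maxc
    else if maxc = c then lruLoop n' 1 (if num ≥ a then a else num) maxc
    else if maxc < c then lruLoop n' 1 a c
    else lruLoop n' 1 num maxc
  else num
termination_by n.toNat
decreasing_by
  all_goals
    have := PySem.Int.floordiv_eq_ediv_of_pos (a := n) (b := 10) (by omega)
    simp only [this]; omega

def longestdigitrun (n : Int) : Int := lruLoop |n| 1 0 0

-- ===== PORT B =====
-- Phase 1 of Source B: the do-while digit loop on abs(n) (least-significant first; 0 gives [0]).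
def digitsB (n : Nat) : List Int :=
  ((n % 10 : Nat) : Int) :: (if h : n / 10 = 0 then [] else digitsB (n / 10))
termination_by n
decreasing_by omega

-- Phase 2 of Source B: head-grouping recursion building the (digit, run length) list.
def runsOf : List Int → List (Int × Int)
  | [] => []
  | d :: t =>
    match runsOf t with
    | (d', k) :: r => if d' = d then (d, k + 1) :: r else (d, 1) :: (d', k) :: r
    | [] => [(d, 1)]

-- Phase 3 of Source B: max run length, then min digit among runs of that length.
def longestdigitrun_alt (n : Int) : Int :=
  let rs := runsOf (digitsB n.natAbs)
  match PySem.List.max? (rs.map Prod.snd) (fun x => x) with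
  | some m =>
    match PySem.List.min? ((rs.filter (fun p => p.2 = m)).map Prod.fst) (fun x => x) with
    | some v => v
    | none => 0   -- unreachable: the filtered list contains a run attaining m
  | none => 0     -- unreachable: the digit list is never empty

-- ===== PRECONDITION & SPEC =====
def Spec_longestdigitrun (n : Int) (out : Int) : Prop := out = longestdigitrun_alt n
instance (n : Int) (out : Int) : Decidable (Spec_longestdigitrun n out) := by unfold Spec_longestdigitrun; infer_instance

-- ===== CLAIM (what is proved, stated in full; the proofs are below) =====
def Claim_equal_longestdigitrun : Prop := ∀ (n : Int), Dom_longestdigitrun n → Spec_longestdigitrun n (longestdigitrun n)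

-- ===== LEMMAS AND PROOFS =====

-- A's loop on the digit LIST (b is the lookahead digit, 0 when the list ends).
def scanL : List Int → Int → Int → Int → Int
  | [], _, num, _ => num
  | a :: t, c, num, maxc =>
    let b := (t.head?).getD 0
    if a = b then scanL t (c + 1) num maxc
    else if maxc = c then scanL t 1 (if num ≥ a then a else num) maxc
    else if maxc < c then scanL t 1 a c
    else scanL t 1 num maxc

-- A's flush, as a fold step over runs; state (maxc, num).
def stepR (s : Int × Int) (p : Int × Int) : Int × Int :=
  if s.1 = p.2 then (s.1, if s.2 ≥ p.1 then p.1 else s.2)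
  else if s.1 < p.2 then (p.2, p.1)
  else s

def foldSt (s : Int × Int) (rs : List (Int × Int)) : Int × Int := rs.foldl stepR s

-- digit list of a Nat, empty at 0 (what A's loop actually consumes).
def digitsA (n : Nat) : List Int :=
  if h : n = 0 then [] else ((n % 10 : Nat) : Int) :: digitsA (n / 10)
termination_by n
decreasing_by omega

-- give the first run c-1 extra length (A enters a flush with running credit c).
def adjust (c : Int) : List (Int × Int) → List (Int × Int)
  | [] => []
  | (d, k) :: r => (d, k + c - 1) :: r

def minNE : List Int → Int
  | [] => 0
  | h :: t => t.foldl min h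

theorem digitsA_head (n : Nat) (h : n ≠ 0) :
    digitsA n = ((n % 10 : Nat) : Int) :: digitsA (n / 10) := by
  rw [digitsA]; simp [h]

theorem bridgeA (m : Nat) : ∀ c num maxc, lruLoop (m : Int) c num maxc = scanL (digitsA m) c num maxc := by
  induction m using Nat.strong_induction_on with
  | _ m ih =>
    intro c num maxc
    by_cases hm : m = 0
    · subst hm; rw [lruLoop, digitsA]; simp [scanL]
    · have hpos : (0 : Int) < (m : Int) := by exact_mod_cast Nat.pos_of_ne_zero hm
      rw [lruLoop, digitsA_head m hm]
      have hmod : PySem.Int.mod (m : Int) 10 = ((m % 10 : Nat) : Int) := by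
        exact_mod_cast PySem.Int.mod_natCast m 10
      have hdiv : PySem.Int.floordiv (m : Int) 10 = ((m / 10 : Nat) : Int) := by
        exact_mod_cast PySem.Int.floordiv_natCast m 10
      have hb : PySem.Int.mod ((m / 10 : Nat) : Int) 10 = ((digitsA (m / 10)).head?).getD 0 := by
        by_cases h0 : m / 10 = 0
        · rw [h0, digitsA]; simp [PySem.Int.mod]
        · rw [digitsA_head _ h0]
          simp [PySem.Int.mod_natCast]
      have ihd := ih (m / 10) (Nat.div_lt_self (Nat.pos_of_ne_zero hm) (by omega))
      simp only [scanL, hpos, dif_pos hpos, hmod, hdiv, hb]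
      split_ifs <;> exact ihd _ _ _

theorem digitsB_eq_digitsA (m : Nat) (hm : m ≠ 0) : digitsB m = digitsA m := by
  induction m using Nat.strong_induction_on with
  | _ m ih =>
    rw [digitsB, digitsA_head m hm]
    by_cases h0 : m / 10 = 0
    · rw [h0]; simp [digitsA]
    · simp only [dif_neg h0]
      rw [ih (m / 10) (Nat.div_lt_self (Nat.pos_of_ne_zero hm) (by omega)) h0]

theorem runsOf_len_ge_one : ∀ ds : List Int, ∀ p ∈ runsOf ds, 1 ≤ p.2 := by
  intro ds
  induction ds with
  | nil => simp [runsOf]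
  | cons d t ih =>
    intro p hp
    rw [runsOf] at hp
    match h : runsOf t with
    | [] =>
      rw [h] at hp
      simp only [List.mem_singleton] at hp
      rw [hp]
    | (d', k) :: r =>
      rw [h] at hp
      dsimp only at hp
      have hk : 1 ≤ k := ih (d', k) (by rw [h]; exact List.mem_cons_self ..)
      by_cases hd : d' = d
      · rw [if_pos hd] at hp
        rcases List.mem_cons.mp hp with h1 | h1
        · rw [h1]; simpa using by omega
        · exact ih p (by rw [h]; exact List.mem_cons_of_mem _ h1)
      · rw [if_neg hd] at hp
        rcases List.mem_cons.mp hp with h1 | h1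
        · rw [h1]
        · rcases List.mem_cons.mp h1 with h2 | h2
          · rw [h2]; exact hk
          · exact ih p (by rw [h]; exact List.mem_cons_of_mem _ h2)

theorem runsOf_head (d : Int) (t : List Int) : ∃ k r, runsOf (d :: t) = (d, k) :: r := by
  rw [runsOf]
  match h : runsOf t with
  | [] => exact ⟨1, [], rfl⟩
  | (d', k) :: r =>
    by_cases hd : d' = d
    · subst hd; simp
    · simp [hd]

-- main list lemma: A's scan = fold of the flush step over the (credit-adjusted) runs
theorem scan_eq_fold : ∀ ds : List Int, ds ≠ [] → ds.getLast? ≠ some 0 →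
    ∀ c num maxc, scanL ds c num maxc = (foldSt (maxc, num) (adjust c (runsOf ds))).2 := by
  intro ds
  induction ds with
  | nil => intro h; exact absurd rfl h
  | cons a t ih =>
    intro _ hlast c num maxc
    match t with
    | [] =>
      have ha : a ≠ 0 := by simpa using hlast
      simp only [scanL, List.head?_nil, Option.getD_none]
      rw [if_neg ha]
      rw [show runsOf [a] = [(a, 1)] from rfl]
      simp only [adjust, foldSt, List.foldl, stepR]
      have hc : (1 : Int) + c - 1 = c := by ring
      rw [hc]
      split_ifs <;> rfl
    | x :: t' =>
      have hlast' : (x :: t').getLast? ≠ some 0 := by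
        rwa [List.getLast?_cons_cons] at hlast
      have ih' := ih (by simp) hlast'
      rw [scanL]
      simp only [List.head?_cons, Option.getD_some]
      obtain ⟨k, r, hr⟩ := runsOf_head x t'
      by_cases hax : a = x
      · subst hax
        rw [show runsOf (a :: a :: t') = (a, k + 1) :: r by rw [runsOf, hr]; simp]
        simp only [if_pos rfl]
        rw [ih' (c + 1) num maxc, hr]
        simp only [adjust]
        have : k + (c + 1) - 1 = k + 1 + c - 1 := by ring
        rw [this]
        simp
      · rw [show runsOf (a :: x :: t') = (a, 1) :: (x, k) :: r by rw [runsOf, hr]; simp [Ne.symm hax]]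
        simp only [if_neg hax]
        have hid : adjust 1 (runsOf (x :: t')) = runsOf (x :: t') := by
          rw [hr]; simp [adjust]
        have hfold : (foldSt (maxc, num) (adjust c ((a, 1) :: (x, k) :: r))).2
            = scanL (x :: t') 1 (stepR (maxc, num) (a, c)).2 (stepR (maxc, num) (a, c)).1 := by
          rw [ih' 1 (stepR (maxc, num) (a, c)).2 (stepR (maxc, num) (a, c)).1, hid, hr]
          simp only [Prod.mk.eta, adjust, foldSt, List.foldl_cons]
          rw [show (1 : Int) + c - 1 = c from by ring]
        rw [hfold]
        simp only [stepR]
        split_ifs <;> rfl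

-- fold characterization: running (maxc, num) state = (max length so far, min digit at that length)
theorem fold_inv : ∀ rs : List (Int × Int), ∀ mc nu : Int, 1 ≤ mc → (∀ p ∈ rs, 1 ≤ p.2) →
    foldSt (mc, nu) rs =
      ((rs.map Prod.snd).foldl max mc,
       if mc = (rs.map Prod.snd).foldl max mc then
         ((rs.filter (fun p => p.2 = (rs.map Prod.snd).foldl max mc)).map Prod.fst).foldl min nu
       else minNE ((rs.filter (fun p => p.2 = (rs.map Prod.snd).foldl max mc)).map Prod.fst)) := by
  intro rs
  induction rs with
  | nil => intro mc nu _ _; simp [foldSt, minNE]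
  | cons p rs' ih =>
    intro mc nu hmc hall
    obtain ⟨d, len⟩ := p
    have hlen : 1 ≤ len := hall (d, len) (by simp)
    have hall' : ∀ q ∈ rs', 1 ≤ q.2 := fun q hq => hall q (by simp [hq])
    have hFge : ∀ (a : Int), a ≤ (rs'.map Prod.snd).foldl max a :=
      fun a => (PySem.List.le_foldl_max (rs'.map Prod.snd) a).1
    simp only [List.map_cons, List.foldl_cons]
    by_cases h1 : mc = len
    · -- tie: num := min num d
      subst h1
      have hstep : foldSt (mc, nu) ((d, mc) :: rs') = foldSt (mc, if nu ≥ d then d else nu) rs' := by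
        simp [foldSt, stepR]
      rw [hstep, ih mc (if nu ≥ d then d else nu) hmc hall']
      simp only [max_self]
      set F := (rs'.map Prod.snd).foldl max mc with hF
      by_cases h2 : mc = F
      · have hcons : ((d, mc) :: rs').filter (fun p => p.2 = F) =
            (d, mc) :: rs'.filter (fun p => p.2 = F) := by
          simp [List.filter_cons, h2]
        rw [if_pos h2, if_pos h2, hcons]
        simp only [List.map_cons, List.foldl_cons]
        have hmin : (if nu ≥ d then d else nu) = min nu d := by
          rw [min_def]; split_ifs <;> omega
        rw [hmin]
      · have hcons : ((d, mc) :: rs').filter (fun p => p.2 = F) =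
            rs'.filter (fun p => p.2 = F) := by
          simp [List.filter_cons, h2]
        rw [if_neg h2, if_neg h2, hcons]
    · by_cases h2 : mc < len
      · -- new max: (len, d)
        have hstep : foldSt (mc, nu) ((d, len) :: rs') = foldSt (len, d) rs' := by
          simp [foldSt, stepR, h1, h2]
        rw [hstep, ih len d hlen hall']
        have hmax : max mc len = len := max_eq_right (le_of_lt h2)
        simp only [hmax]
        set F := (rs'.map Prod.snd).foldl max len with hF
        have hlenF : len ≤ F := hFge len
        have hmcF : ¬ (mc = F) := by omega
        rw [if_neg hmcF]
        by_cases h3 : len = F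
        · have hcons : ((d, len) :: rs').filter (fun p => p.2 = F) =
              (d, len) :: rs'.filter (fun p => p.2 = F) := by
            simp [List.filter_cons, h3]
          rw [if_pos h3, hcons]
          simp [minNE]
        · have hcons : ((d, len) :: rs').filter (fun p => p.2 = F) =
              rs'.filter (fun p => p.2 = F) := by
            simp [List.filter_cons, h3]
          rw [if_neg h3, hcons]
      · -- shorter run: state unchanged
        have hstep : foldSt (mc, nu) ((d, len) :: rs') = foldSt (mc, nu) rs' := by
          simp [foldSt, stepR, h1, h2]
        rw [hstep, ih mc nu hmc hall']
        have hmax : max mc len = mc := max_eq_left (by omega)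
        simp only [hmax]
        set F := (rs'.map Prod.snd).foldl max mc with hF
        have hmcF : mc ≤ F := hFge mc
        have hlenF : ¬ (len = F) := by omega
        have hcons : ((d, len) :: rs').filter (fun p => p.2 = F) =
            rs'.filter (fun p => p.2 = F) := by
          simp [List.filter_cons, hlenF]
        rw [hcons]

-- the max is attained in the list
theorem foldl_max_attained (t : List Int) (a : Int) :
    t.foldl max a = a ∨ t.foldl max a ∈ t := PySem.List.foldl_max_mem t a

theorem getLast?_cons_ne_nil {α : Type} (a : α) (l : List α) (h : l ≠ []) :
    (a :: l).getLast? = l.getLast? := by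
  cases l with
  | nil => exact absurd rfl h
  | cons b t => rw [List.getLast?_cons_cons]

theorem digitsB_last_ne_zero (m : Nat) (hm : m ≠ 0) : (digitsB m).getLast? ≠ some 0 := by
  induction m using Nat.strong_induction_on with
  | _ m ih =>
    rw [digitsB]
    by_cases h0 : m / 10 = 0
    · simp only [dif_pos h0, List.getLast?_singleton]
      have : m % 10 = m := Nat.mod_eq_of_lt (by omega)
      rw [this]
      intro hc
      simp at hc
      omega
    · simp only [dif_neg h0]
      have hne : digitsB (m / 10) ≠ [] := by rw [digitsB]; simp
      rw [getLast?_cons_ne_nil _ _ hne]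
      exact ih (m / 10) (Nat.div_lt_self (Nat.pos_of_ne_zero hm) (by omega)) h0

-- B's pipeline unwound on a nonempty run list with lengths ≥ 1
theorem alt_eval (rs : List (Int × Int)) (d0 : Int) (l0 : Int) (rest : List (Int × Int))
    (hrs : rs = (d0, l0) :: rest) (hall : ∀ p ∈ rs, 1 ≤ p.2) :
    (match PySem.List.max? (rs.map Prod.snd) (fun x => x) with
     | some m =>
       match PySem.List.min? ((rs.filter (fun p => p.2 = m)).map Prod.fst) (fun x => x) with
       | some v => v
       | none => 0
     | none => 0) = (foldSt (0, 0) rs).2 := by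
  subst hrs
  have hl0 : 1 ≤ l0 := hall (d0, l0) (by simp)
  have hall' : ∀ p ∈ rest, 1 ≤ p.2 := fun q hq => hall q (by simp [hq])
  have hstep : foldSt (0, 0) ((d0, l0) :: rest) = foldSt (l0, d0) rest := by
    have hz : ¬ ((0 : Int) = l0) := by omega
    have hz' : (0 : Int) < l0 := by omega
    simp [foldSt, stepR, hz, hz']
  rw [hstep, fold_inv rest l0 d0 hl0 hall']
  set F := (rest.map Prod.snd).foldl max l0 with hF
  have hMax : PySem.List.max? (((d0, l0) :: rest).map Prod.snd) (fun x => x) = some F := by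
    simp only [List.map_cons]
    exact PySem.List.max?_id_cons l0 (rest.map Prod.snd)
  rw [hMax]
  dsimp only
  by_cases h2 : l0 = F
  · have hfil : (((d0, l0) :: rest).filter (fun p => p.2 = F)).map Prod.fst =
        d0 :: ((rest.filter (fun p => p.2 = F)).map Prod.fst) := by
      simp [List.filter_cons, h2]
    rw [hfil, PySem.List.min?_id_cons]
    dsimp only
    rw [if_pos h2]
  · have hfil : (((d0, l0) :: rest).filter (fun p => p.2 = F)).map Prod.fst =
        (rest.filter (fun p => p.2 = F)).map Prod.fst := by
      simp [List.filter_cons, h2]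
    rw [hfil]
    -- F is attained in rest, so the filtered list is nonempty
    have hmem : F ∈ rest.map Prod.snd := by
      rcases foldl_max_attained (rest.map Prod.snd) l0 with h | h
      · exact absurd h.symm h2
      · exact h
    obtain ⟨q, hq, hq2⟩ := List.mem_map.mp hmem
    have hne : (rest.filter (fun p => p.2 = F)).map Prod.fst ≠ [] := by
      simp only [ne_eq, List.map_eq_nil_iff, List.filter_eq_nil_iff]
      push_neg
      exact ⟨q, hq, by simp [hq2]⟩
    rcases hm : (rest.filter (fun p => p.2 = F)).map Prod.fst with _ | ⟨h, t⟩
    · exact absurd hm hne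
    · rw [hm, PySem.List.min?_id_cons]
      dsimp only
      rw [if_neg h2]
      rfl

-- ===== VERDICT (by name: the statement is the Claim_ definition above) =====
theorem longestdigitrun_spec : Claim_equal_longestdigitrun := by
  intro n _
  unfold Spec_longestdigitrun longestdigitrun longestdigitrun_alt
  have habs : |n| = (n.natAbs : Int) := Int.abs_eq_natAbs n
  rw [habs]
  set m := n.natAbs with hm
  by_cases h0 : m = 0
  · rw [h0]
    have h1 : lruLoop ((0 : Nat) : Int) 1 0 0 = 0 := by rw [lruLoop]; norm_num
    have h2 : digitsB 0 = [0] := by rw [digitsB]; simp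
    rw [h1, h2]
    decide
  · -- n ≠ 0 path
    have hds : digitsB m = digitsA m := digitsB_eq_digitsA m h0
    have hlast : (digitsB m).getLast? ≠ some 0 := digitsB_last_ne_zero m h0
    have hne : digitsB m ≠ [] := by rw [digitsB]; simp
    rw [bridgeA m 1 0 0, ← hds]
    match hdd : digitsB m with
    | [] => exact absurd hdd hne
    | a :: t =>
      rw [hdd] at hlast
      rw [scan_eq_fold (a :: t) (by simp) hlast 1 0 0]
      obtain ⟨k, r, hr⟩ := runsOf_head a t
      have hadj : adjust 1 (runsOf (a :: t)) = runsOf (a :: t) := by rw [hr]; simp [adjust]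
      rw [hadj]
      exact (alt_eval (runsOf (a :: t)) a k r hr (runsOf_len_ge_one (a :: t))).symm
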